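-- pv_equiv track=rewrite | github.com/MartinNovotny25/AOC-2024 | solutions/AOC_1.py | part2
-- ===== SOURCE A (Python) =====
-- def part2(sorted_arr_left, sorted_arr_right):
--     right_occurences = {}
--     acc = 0
--
--     for item in sorted_arr_right:
--         if item not in right_occurences.keys():
--             right_occurences[item] = 1
--         else:
--             right_occurences[item] += 1
--
--     for item in sorted_arr_left:
--         if item in right_occurences.keys():
--             acc += int(item) * int(right_occurences[item])
--     return acc
-- ===== SOURCE B (Python) =====
-- def part2(sorted_arr_left, sorted_arr_right):
--     L = sorted(sorted_arr_left)
--     R = sorted(sorted_arr_right)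
--     n, m = len(L), len(R)
--     acc = 0
--     i = j = 0
--     while i < n and j < m:
--         if L[i] < R[j]:
--             i += 1
--         elif R[j] < L[i]:
--             j += 1
--         else:
--             v = L[i]
--             ci = 0
--             while i < n and L[i] == v:
--                 ci += 1
--                 i += 1
--             cj = 0
--             while j < m and R[j] == v:
--                 cj += 1
--                 j += 1
--             acc += int(v) * ci * cj
--     return acc
-- ===== Notes on version B (the rewrite author's own statement) =====
-- stated objective: alternative
-- what changed: Replaces the frequency-dict with a sort-then-merge: both lists are sorted and a two-pointer sweep multiplies each common value by its group sizes on both sides; no counting container is built.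
import Mathlib
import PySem

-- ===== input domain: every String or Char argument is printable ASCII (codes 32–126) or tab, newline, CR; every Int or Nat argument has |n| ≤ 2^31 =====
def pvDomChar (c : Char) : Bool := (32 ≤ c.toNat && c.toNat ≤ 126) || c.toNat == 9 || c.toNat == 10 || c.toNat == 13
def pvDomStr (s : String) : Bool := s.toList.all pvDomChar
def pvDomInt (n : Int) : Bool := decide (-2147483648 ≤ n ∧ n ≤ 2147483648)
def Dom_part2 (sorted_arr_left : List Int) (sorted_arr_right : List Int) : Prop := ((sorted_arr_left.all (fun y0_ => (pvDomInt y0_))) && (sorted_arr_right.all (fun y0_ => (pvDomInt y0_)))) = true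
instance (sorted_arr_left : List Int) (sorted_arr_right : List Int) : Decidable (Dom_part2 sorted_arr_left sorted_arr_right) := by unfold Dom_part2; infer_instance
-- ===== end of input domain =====

-- B replaces A's frequency dict with sort-then-merge: sort both lists, sweep them in
-- parallel, and for each common value add value * (left group size) * (right group size).

-- ===== PORT A =====
def part2 (sorted_arr_left : List Int) (sorted_arr_right : List Int) : Int :=
  let right_occurences : PySem.Dict Int Int :=
    sorted_arr_right.foldl
      (fun d item =>
        if d.contains item = false then d.insert item 1
        else d.insert item (d.getD item 0 + 1))
      PySem.Dict.empty
  sorted_arr_left.foldl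
    (fun acc item =>
      if right_occurences.contains item then acc + item * right_occurences.getD item 0
      else acc)
    0

-- ===== PORT B =====
-- the two-pointer sweep of Source B: advance the smaller side; on a match consume the
-- whole equal-value group on both sides (the inner while-loops = takeWhile/dropWhile)
def mergeSum : List Int → List Int → Int
  | [], _ => 0
  | _ :: _, [] => 0
  | a :: l, b :: r =>
    if a < b then mergeSum l (b :: r)
    else if b < a then mergeSum (a :: l) r
    else
      let ci : Int := 1 + ((l.takeWhile (fun x => x == a)).length : Int)
      let cj : Int := 1 + ((r.takeWhile (fun x => x == a)).length : Int)
      a * ci * cj + mergeSum (l.dropWhile (fun x => x == a)) (r.dropWhile (fun x => x == a))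
termination_by l r => l.length + r.length
decreasing_by
  all_goals
    have h1 := List.length_dropWhile_le (p := fun x => x == a) (l := l)
    have h2 := List.length_dropWhile_le (p := fun x => x == a) (l := r)
    simp
    try omega

def part2_alt (sorted_arr_left : List Int) (sorted_arr_right : List Int) : Int :=
  mergeSum (PySem.List.sorted sorted_arr_left (fun x => x) false)
           (PySem.List.sorted sorted_arr_right (fun x => x) false)

-- ===== PRECONDITION & SPEC =====
def Spec_part2 (sorted_arr_left : List Int) (sorted_arr_right : List Int) (out : Int) : Prop := out = part2_alt sorted_arr_left sorted_arr_right
instance (sorted_arr_left : List Int) (sorted_arr_right : List Int) (out : Int) : Decidable (Spec_part2 sorted_arr_left sorted_arr_right out) := by unfold Spec_part2; infer_instance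

-- ===== CLAIM (what is proved, stated in full; the proofs are below) =====
def Claim_equal_part2 : Prop := ∀ (sorted_arr_left : List Int) (sorted_arr_right : List Int), Dom_part2 sorted_arr_left sorted_arr_right → Spec_part2 sorted_arr_left sorted_arr_right (part2 sorted_arr_left sorted_arr_right)

-- ===== LEMMAS AND PROOFS =====

-- A computes the sum over the left list of x * (count of x in the right list).
lemma partA_eq_sum (l r : List Int) :
    part2 l r = (l.map (fun x => x * (r.count x : Int))).sum := by
  unfold part2
  have hstep :
      (fun (d : PySem.Dict Int Int) (item : Int) =>
          if d.contains item = false then d.insert item 1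
          else d.insert item (d.getD item 0 + 1))
        = (fun d item => d.insert item (d.getD item 0 + 1)) := by
    funext d item
    by_cases h : d.contains item = false
    · simp [h, PySem.Dict.getD_of_not_contains]
    · simp [h]
  rw [hstep, PySem.Dict.foldl_insert_getD_add_one_eq_counter]
  have hcongr : l.foldl
      (fun acc item =>
        if (PySem.Dict.counter r).contains item then
          acc + item * (PySem.Dict.counter r).getD item 0
        else acc) 0
      = l.foldl (fun acc x => acc + x * (r.count x : Int)) 0 := by
    apply PySem.List.foldl_congr_mem
    intro acc x _
    by_cases h : x ∈ r
    · simp [PySem.Dict.contains_counter, PySem.Dict.getD_counter, h]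
    · simp [PySem.Dict.contains_counter, h, List.count_eq_zero_of_not_mem h]
  rw [hcongr, PySem.List.foldl_add]
  simp

-- the merge sweep on two (≤-)sorted lists computes the same sum

-- every element surviving dropWhile (== a) on an a-headed sorted run is strictly above a
lemma dropWhile_gt (a : Int) (l : List Int) (hl : l.Pairwise (· ≤ ·))
    (ha : ∀ x ∈ l, a ≤ x) :
    ∀ y ∈ l.dropWhile (fun x => x == a), a < y := by
  induction l with
  | nil => simp
  | cons x xs ih =>
    intro y hy
    by_cases hx : x = a
    · subst hx
      simp only [List.dropWhile_cons, beq_self_eq_true] at hy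
      exact ih hl.of_cons (fun z hz => ha z (by simp [hz])) y hy
    · rw [List.dropWhile_cons, if_neg (by simp [hx])] at hy
      have hax : a < x := lt_of_le_of_ne (ha x (by simp)) (Ne.symm hx)
      rcases List.mem_cons.mp hy with h | h
      · exact h ▸ hax
      · exact lt_of_lt_of_le hax (List.rel_of_pairwise_cons hl h)

-- sum of a list on which f is constantly c
lemma sum_map_const' (l : List Int) (f : Int → Int) (c : Int)
    (h : ∀ x ∈ l, f x = c) : (l.map f).sum = l.length * c := by
  induction l with
  | nil => simp
  | cons x xs ih =>
    simp only [List.map_cons, List.sum_cons, h x (by simp),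
      ih (fun y hy => h y (by simp [hy])), List.length_cons]
    push_cast; ring

lemma mergeSum_eq : ∀ (l r : List Int), l.Pairwise (· ≤ ·) → r.Pairwise (· ≤ ·) →
    mergeSum l r = (l.map (fun x => x * (r.count x : Int))).sum := by
  intro l r
  induction l, r using mergeSum.induct with
  | case1 r => intro _ _; simp [mergeSum]
  | case2 a l =>
    intro _ _
    simp [mergeSum]
  | case3 a l b r hab ih =>
    intro hl hr
    rw [mergeSum, if_pos hab, ih hl.of_cons hr]
    have hcnt : (b :: r).count a = 0 := by
      rw [List.count_eq_zero]
      intro hmem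
      rcases List.mem_cons.mp hmem with h | h
      · omega
      · exact absurd (List.rel_of_pairwise_cons hr h) (by omega)
    simp [hcnt]
  | case4 a l b r hab hba ih =>
    intro hl hr
    rw [mergeSum, if_neg hab, if_pos hba, ih hl hr.of_cons]
    congr 1
    apply List.map_congr_left
    intro x hx
    have hax : a ≤ x := by
      rcases List.mem_cons.mp hx with h | h
      · omega
      · exact List.rel_of_pairwise_cons hl h
    have : (b :: r).count x = r.count x := by
      rw [List.count_cons]
      simp only [beq_iff_eq]
      have hne : ¬ b = x := by omega
      simp [hne]
    rw [this]
  | case5 a l b r hab hba ih =>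
    intro hl hr
    have heq : a = b := le_antisymm (not_lt.mp hba) (not_lt.mp hab)
    subst heq
    have hlmem : ∀ x ∈ l, a ≤ x := fun x hx => List.rel_of_pairwise_cons hl hx
    have hrmem : ∀ x ∈ r, a ≤ x := fun x hx => List.rel_of_pairwise_cons hr hx
    have hdl := dropWhile_gt a l hl.of_cons hlmem
    have hdr := dropWhile_gt a r hr.of_cons hrmem
    have htl : ∀ x ∈ l.takeWhile (fun x => x == a), x = a := by
      intro x hx
      have := List.mem_takeWhile_imp hx
      simpa using this
    have htr : ∀ x ∈ r.takeWhile (fun x => x == a), x = a := by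
      intro x hx
      have := List.mem_takeWhile_imp hx
      simpa using this
    -- count of a in a :: r  =  1 + length of the right a-run
    have hcount_a : ((a :: r).count a : Int)
        = 1 + ((r.takeWhile (fun x => x == a)).length : Int) := by
      have hsplit : r = r.takeWhile (fun x => x == a) ++ r.dropWhile (fun x => x == a) :=
        (List.takeWhile_append_dropWhile).symm
      rw [List.count_cons_self]
      conv_lhs => rw [hsplit]
      rw [List.count_append]
      have h1 : (r.takeWhile (fun x => x == a)).count a
          = (r.takeWhile (fun x => x == a)).length := by
        rw [List.count_eq_length]
        intro b hb
        exact (htr b hb).symm ▸ (by simp)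
      have h2 : (r.dropWhile (fun x => x == a)).count a = 0 := by
        rw [List.count_eq_zero]
        intro hmem
        exact absurd (hdr a hmem) (lt_irrefl a)
      rw [h1, h2]
      push_cast; ring
    -- count of any x > a in a :: r  =  its count in the right remainder
    have hcount_gt : ∀ x, a < x →
        (a :: r).count x = (r.dropWhile (fun x => x == a)).count x := by
      intro x hx
      have hsplit : r = r.takeWhile (fun x => x == a) ++ r.dropWhile (fun x => x == a) :=
        (List.takeWhile_append_dropWhile).symm
      rw [List.count_cons]
      conv_lhs => rw [hsplit]
      rw [List.count_append]
      have h1 : (r.takeWhile (fun x => x == a)).count x = 0 := by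
        rw [List.count_eq_zero]
        intro hmem
        exact absurd (htr x hmem) (by omega)
      have h2 : ¬ a = x := by omega
      simp [h1, h2]
    rw [mergeSum, if_neg hab, if_neg hba]
    rw [ih (hl.of_cons.sublist (List.dropWhile_sublist _))
          (hr.of_cons.sublist (List.dropWhile_sublist _))]
    -- decompose the sum over a :: l into head, left a-run, remainder
    have hsplitl : l = l.takeWhile (fun x => x == a) ++ l.dropWhile (fun x => x == a) :=
      (List.takeWhile_append_dropWhile).symm
    conv_rhs => rw [hsplitl]
    rw [List.map_cons, List.map_append, List.sum_cons, List.sum_append]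
    have hrun : ((l.takeWhile (fun x => x == a)).map
        (fun x => x * ((a :: r).count x : Int))).sum
        = ((l.takeWhile (fun x => x == a)).length : Int)
          * (a * (1 + ((r.takeWhile (fun x => x == a)).length : Int))) := by
      rw [sum_map_const' _ _ (a * (1 + ((r.takeWhile (fun x => x == a)).length : Int)))]
      intro x hx
      rw [htl x hx, hcount_a]
    have hrem : ((l.dropWhile (fun x => x == a)).map
        (fun x => x * ((a :: r).count x : Int))).sum
        = ((l.dropWhile (fun x => x == a)).map
        (fun x => x * (((r.dropWhile (fun x => x == a)).count x : Int)))).sum := by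
      congr 1
      apply List.map_congr_left
      intro x hx
      rw [hcount_gt x (hdl x hx)]
    rw [hrun, hrem, hcount_a]
    ring

theorem part2_spec_aux (l r : List Int) : part2 l r = part2_alt l r := by
  have hperml := PySem.List.sorted_perm (xs := l) (key := fun x => x) (rev := false)
  have hpermr := PySem.List.sorted_perm (xs := r) (key := fun x => x) (rev := false)
  have hpl : (PySem.List.sorted l (fun x => x) false).Pairwise (· ≤ ·) := by
    simpa using PySem.List.sorted_pairwise (xs := l) (key := fun x => x)
  have hpr : (PySem.List.sorted r (fun x => x) false).Pairwise (· ≤ ·) := by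
    simpa using PySem.List.sorted_pairwise (xs := r) (key := fun x => x)
  unfold part2_alt
  rw [mergeSum_eq _ _ hpl hpr, partA_eq_sum]
  have hmap : (PySem.List.sorted l (fun x => x) false).map
      (fun x => x * (((PySem.List.sorted r (fun x => x) false).count x : Int)))
      = (PySem.List.sorted l (fun x => x) false).map (fun x => x * (r.count x : Int)) := by
    apply List.map_congr_left
    intro x _
    rw [hpermr.count_eq]
  rw [hmap]
  exact ((hperml.map _).sum_eq).symm

-- ===== VERDICT (by name: the statement is the Claim_ definition above) =====
theorem part2_spec : Claim_equal_part2 := by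
  intro l r _
  exact part2_spec_aux l r
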